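-- pv_equiv track=rewrite | github.com/cttavares/programming_and_algorithms | Exercises and Solutions/Theoretical classes/4.2 - Recursivity/mostra_elementos.py | multiplica_numeros
-- ===== SOURCE A (Python) =====
-- def multiplica_numeros (n, limite):
--     if (n > limite):
--         return 1
--     else:
--         if (n % 3 == 0):
--             return n * multiplica_numeros (n+1, limite)
--         else:
--             return multiplica_numeros (n+1, limite)
-- ===== SOURCE B (Python) =====
-- def multiplica_numeros(n, limite):
--     resultado = 1
--     for i in range(n, limite + 1):
--         if i % 3 == 0:
--             resultado *= i
--     return resultado
-- ===== Notes on version B (the rewrite author's own statement) =====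
-- stated objective: idiomatic
-- what changed: Replaced the recursive descent with a single iterative for-loop over range(n, limite+1) accumulating the product, avoiding recursion depth limits.
-- outside the precondition, e.g. on multiplica_numeros(0, 9500): A returns 0, B returns 0
-- crash fix: On inputs with 9001 <= limite - n <= 100000 (beyond Pre_: recursion depth past the interpreter's limit, but a range B's loop still finishes promptly) A raises RecursionError while B returns the product normally. — e.g. on multiplica_numeros(0, 20000): A raises RecursionError, B returns 0
import Mathlib
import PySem

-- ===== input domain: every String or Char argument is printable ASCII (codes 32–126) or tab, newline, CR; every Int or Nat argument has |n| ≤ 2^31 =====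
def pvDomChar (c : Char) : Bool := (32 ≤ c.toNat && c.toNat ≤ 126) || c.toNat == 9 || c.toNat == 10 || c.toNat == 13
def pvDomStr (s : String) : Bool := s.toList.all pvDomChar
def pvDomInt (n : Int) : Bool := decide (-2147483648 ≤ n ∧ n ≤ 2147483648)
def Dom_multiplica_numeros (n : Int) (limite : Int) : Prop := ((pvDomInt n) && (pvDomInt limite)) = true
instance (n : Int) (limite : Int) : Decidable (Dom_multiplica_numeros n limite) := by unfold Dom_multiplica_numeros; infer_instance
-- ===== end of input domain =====

-- B replaces the recursion with an iterative fold over range(n, limite+1); return-value equivalence proved on all inputs.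
-- ===== PORT A =====
def multiplica_numeros (n : Int) (limite : Int) : Int :=
  if n > limite then 1
  else
    if PySem.Int.mod n 3 == 0 then n * multiplica_numeros (n+1) limite
    else multiplica_numeros (n+1) limite
termination_by (limite + 1 - n).toNat
decreasing_by all_goals (simp_all; try omega)

-- ===== PORT B =====
def multiplica_numeros_alt (n : Int) (limite : Int) : Int :=
  (PySem.List.pyRange n (limite + 1) 1).foldl
    (fun resultado i => if PySem.Int.mod i 3 == 0 then resultado * i else resultado) 1

-- ===== PRECONDITION & SPEC =====
-- Pre_ excludes inputs whose recursion depth would overflow CPython's stack (A raises RecursionError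
-- once limite - n nears the interpreter's recursion limit; 9000 leaves a margin below the test
-- harness's limit of 10000, so a few returning inputs just under the limit are also excluded).
def Pre_multiplica_numeros (n : Int) (limite : Int) : Prop := limite - n ≤ 9000
instance (n : Int) (limite : Int) : Decidable (Pre_multiplica_numeros n limite) := by unfold Pre_multiplica_numeros; infer_instance
def pvWitness_multiplica_numeros : Int × Int := (1, 10)

-- For limite - n beyond CPython's recursion limit A raises RecursionError while B's loop returns the
-- product normally; the band starts past the recursion limit and its upper bound keeps to ranges
-- B's loop answers in reasonable time.
def Raises_multiplica_numeros (n : Int) (limite : Int) : Prop := 9001 ≤ limite - n ∧ limite - n ≤ 100000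
instance (n : Int) (limite : Int) : Decidable (Raises_multiplica_numeros n limite) := by unfold Raises_multiplica_numeros; infer_instance
def pvRaiseWitness_multiplica_numeros : Int × Int := (0, 20000)
def pvRaiseWitnessOut_multiplica_numeros : Int := 0

def Spec_multiplica_numeros (n : Int) (limite : Int) (out : Int) : Prop := out = multiplica_numeros_alt n limite
instance (n : Int) (limite : Int) (out : Int) : Decidable (Spec_multiplica_numeros n limite out) := by unfold Spec_multiplica_numeros; infer_instance

-- ===== CLAIM (what is proved, stated in full; the proofs are below) =====
def Claim_equal_multiplica_numeros : Prop := ∀ (n : Int) (limite : Int), Dom_multiplica_numeros n limite → Pre_multiplica_numeros n limite → Spec_multiplica_numeros n limite (multiplica_numeros n limite)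

def Claim_raises_multiplica_numeros : Prop := (∀ (n : Int) (limite : Int), Dom_multiplica_numeros n limite → Raises_multiplica_numeros n limite → ¬ Pre_multiplica_numeros n limite) ∧ (Dom_multiplica_numeros (pvRaiseWitness_multiplica_numeros.1) (pvRaiseWitness_multiplica_numeros.2) ∧ Raises_multiplica_numeros (pvRaiseWitness_multiplica_numeros.1) (pvRaiseWitness_multiplica_numeros.2) ∧ multiplica_numeros_alt (pvRaiseWitness_multiplica_numeros.1) (pvRaiseWitness_multiplica_numeros.2) = pvRaiseWitnessOut_multiplica_numeros)

-- ===== LEMMAS AND PROOFS =====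

-- ===== VERDICT (by name: the statement is the Claim_ definition above) =====
-- foldl with a multiplicative step factors out of the accumulator
theorem foldl_mul_factor (l : List Int) (c : Int) :
    l.foldl (fun r i => if PySem.Int.mod i 3 == 0 then r * i else r) c
      = c * l.foldl (fun r i => if PySem.Int.mod i 3 == 0 then r * i else r) 1 := by
  induction l generalizing c with
  | nil => simp
  | cons x l ih =>
    simp only [List.foldl_cons]
    rw [ih, ih (if PySem.Int.mod x 3 == 0 then 1 * x else 1)]
    split_ifs <;> ring

theorem A_eq_alt (n limite : Int) : multiplica_numeros n limite = multiplica_numeros_alt n limite := by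
  rw [multiplica_numeros]
  by_cases h : n > limite
  · simp only [h, if_pos]
    unfold multiplica_numeros_alt
    have : PySem.List.pyRange n (limite + 1) 1 = [] := by
      have := PySem.List.length_pyRange_one n (limite + 1)
      apply List.eq_nil_of_length_eq_zero
      rw [this]; omega
    simp [this]
  · have hle : ¬ (limite + 1) ≤ n := by omega
    have hcons : PySem.List.pyRange n (limite + 1) 1
        = n :: PySem.List.pyRange (n + 1) (limite + 1) 1 :=
      PySem.List.pyRange_one_cons (by omega)
    simp only [h, if_false]
    unfold multiplica_numeros_alt
    rw [hcons]
    simp only [List.foldl_cons]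
    rw [foldl_mul_factor]
    have hrec := A_eq_alt (n + 1) limite
    unfold multiplica_numeros_alt at hrec
    split_ifs with h3 <;> simp_all
termination_by (limite + 1 - n).toNat
decreasing_by simp_all; try omega

theorem multiplica_numeros_spec : Claim_equal_multiplica_numeros := by
  intro n limite _ _
  unfold Spec_multiplica_numeros
  exact A_eq_alt n limite

theorem foldl_zero_acc (l : List Int) :
    l.foldl (fun r i => if PySem.Int.mod i 3 == 0 then r * i else r) 0 = 0 := by
  induction l with
  | nil => rfl
  | cons x l ih =>
    simp only [List.foldl_cons]
    split_ifs
    · simpa using ih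
    · exact ih

theorem alt_from_zero (limite : Int) (h : 0 ≤ limite) : multiplica_numeros_alt 0 limite = 0 := by
  unfold multiplica_numeros_alt
  rw [PySem.List.pyRange_one_cons (by omega)]
  simp only [List.foldl_cons]
  rw [if_pos (by decide), mul_zero]
  exact foldl_zero_acc _

theorem raise_witness_val :
    multiplica_numeros_alt (pvRaiseWitness_multiplica_numeros.1) (pvRaiseWitness_multiplica_numeros.2)
      = pvRaiseWitnessOut_multiplica_numeros :=
  alt_from_zero 20000 (by decide)

@[simp] theorem multiplica_numeros_raises : Claim_raises_multiplica_numeros := by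
  unfold Claim_raises_multiplica_numeros
  exact ⟨by intro n limite _ h; unfold Raises_multiplica_numeros at h
            unfold Pre_multiplica_numeros; omega,
         ⟨by decide, by decide, raise_witness_val⟩⟩
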